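-- pv_equiv track=rewrite | github.com/Joseph1103/Proyecto_Taller | Tarea de Intro.py | repetidos_aux
-- ===== SOURCE A (Python) =====
-- def repetidos_aux(num, digitos, resultado):
--     if(num == 0):
--         if(digitos == []):
--             return resultado
--         elif(digitos[0] in digitos [1:]):
--             if(digitos[0] in resultado):
--                 return repetidos_aux(num, digitos[1:], resultado)
--             else:
--                 return repetidos_aux(num, digitos[1:], resultado + [digitos[0]])
--         else:
--             return repetidos_aux(num, digitos[1:], resultado)
--     else:
--         digitos.append(num%10)
--         return repetidos_aux(num//10, digitos, resultado)
-- ===== SOURCE B (Python) =====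
-- def repetidos_aux(num, digitos, resultado):
--     while num != 0:
--         digitos.append(num % 10)
--         num //= 10
--     remaining = {}
--     for d in digitos:
--         remaining[d] = remaining.get(d, 0) + 1
--     res = list(resultado)
--     seen = set(resultado)
--     for d in digitos:
--         remaining[d] -= 1
--         if remaining[d] > 0 and d not in seen:
--             res.append(d)
--             seen.add(d)
--     return res
-- ===== Notes on version B (the rewrite author's own statement) =====
-- stated objective: faster
-- what changed: Replaced the recursion that re-scans the remaining suffix (d in digitos[1:]) and the accumulated result list at every step by explicit loops with a pre-built occurrence-count dict and a seen set, so each element is decided in O(1) expected time.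
import Mathlib
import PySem

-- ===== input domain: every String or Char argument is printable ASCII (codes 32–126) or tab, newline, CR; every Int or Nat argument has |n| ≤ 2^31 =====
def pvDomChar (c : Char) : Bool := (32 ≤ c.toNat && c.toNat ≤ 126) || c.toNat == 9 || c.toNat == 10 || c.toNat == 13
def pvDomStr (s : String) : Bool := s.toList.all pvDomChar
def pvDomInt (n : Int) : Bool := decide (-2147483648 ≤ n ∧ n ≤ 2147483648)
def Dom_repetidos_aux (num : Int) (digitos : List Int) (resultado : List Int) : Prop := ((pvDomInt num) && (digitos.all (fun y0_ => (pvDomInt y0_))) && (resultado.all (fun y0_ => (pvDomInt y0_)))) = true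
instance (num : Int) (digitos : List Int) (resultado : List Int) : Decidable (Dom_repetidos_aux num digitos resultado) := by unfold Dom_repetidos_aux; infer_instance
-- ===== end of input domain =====

-- B replaces A's recursion (which re-scans the remaining suffix and the result list at every
-- step) by explicit loops with a count dict and a seen set; both Pythons mutate `digitos` in
-- place identically, and the equivalence proved here is about the RETURN value.


-- ===== PORT A =====
-- Literal transliteration of A: `digitos[0]` / `digitos[1:]` appear as the head/tail of the
-- match; for num ≠ 0 with num < 0 Python recurses forever (num//10 never reaches 0), so the
-- final `else` branch is a totality guard outside Pre_.
def repetidos_aux (num : Int) (digitos : List Int) (resultado : List Int) : List Int :=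
  if num = 0 then
    match digitos with
    | [] => resultado
    | d :: t =>
      if t.contains d then
        if resultado.contains d then repetidos_aux num t resultado
        else repetidos_aux num t (resultado ++ [d])
      else repetidos_aux num t resultado
  else if 0 < num then
    repetidos_aux (PySem.Int.floordiv num 10) (digitos ++ [PySem.Int.mod num 10]) resultado
  else resultado
termination_by (num.toNat, digitos.length)
decreasing_by
  · exact Prod.Lex.right _ (by simp only [List.length_cons]; omega)
  · exact Prod.Lex.right _ (by simp only [List.length_cons]; omega)
  · exact Prod.Lex.right _ (by simp only [List.length_cons]; omega)
  · apply Prod.Lex.left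
    rw [PySem.Int.floordiv_eq_ediv_of_pos (by norm_num : (0:Int) < 10)]
    omega

-- ===== PORT B =====
-- the `while num != 0:` digit-collecting loop of Source B (same totality guard for num < 0)
def pvCollect (num : Int) (digitos : List Int) : List Int :=
  if num = 0 then digitos
  else if 0 < num then pvCollect (PySem.Int.floordiv num 10) (digitos ++ [PySem.Int.mod num 10])
  else digitos
termination_by num.toNat
decreasing_by
  rw [PySem.Int.floordiv_eq_ediv_of_pos (by norm_num : (0:Int) < 10)]
  omega

-- one iteration of Source B's main loop over the state (remaining, res, seen)
def pvStep (st : PySem.Dict Int Int × List Int × PySem.Set Int) (d : Int) :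
    PySem.Dict Int Int × List Int × PySem.Set Int :=
  let rem := st.1.insert d (st.1.getD d 0 - 1)
  if 0 < rem.getD d 0 ∧ d ∉ st.2.2 then (rem, st.2.1 ++ [d], PySem.Set.add st.2.2 d)
  else (rem, st.2.1, st.2.2)

def repetidos_aux_alt (num : Int) (digitos : List Int) (resultado : List Int) : List Int :=
  let ds := pvCollect num digitos
  let remaining := ds.foldl (fun d x => d.insert x (d.getD x 0 + 1)) PySem.Dict.empty
  (ds.foldl pvStep (remaining, resultado, PySem.Set.ofList resultado)).2.1

-- ===== PRECONDITION & SPEC =====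
-- Pre_ excludes num < 0, on which Python A recurses forever (num//10 never reaches 0) and
-- raises RecursionError (B's while loop diverges there too).
def Pre_repetidos_aux (num : Int) (digitos : List Int) (resultado : List Int) : Prop := 0 ≤ num
instance (num : Int) (digitos : List Int) (resultado : List Int) : Decidable (Pre_repetidos_aux num digitos resultado) := by unfold Pre_repetidos_aux; infer_instance
def pvWitness_repetidos_aux : Int × List Int × List Int := (121, [], [])

def Spec_repetidos_aux (num : Int) (digitos : List Int) (resultado : List Int) (out : List Int) : Prop := out = repetidos_aux_alt num digitos resultado
instance (num : Int) (digitos : List Int) (resultado : List Int) (out : List Int) : Decidable (Spec_repetidos_aux num digitos resultado out) := by unfold Spec_repetidos_aux; infer_instance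

-- ===== CLAIM (what is proved, stated in full; the proofs are below) =====
def Claim_equal_repetidos_aux : Prop := ∀ (num : Int) (digitos : List Int) (resultado : List Int), Dom_repetidos_aux num digitos resultado → Pre_repetidos_aux num digitos resultado → Spec_repetidos_aux num digitos resultado (repetidos_aux num digitos resultado)

-- ===== LEMMAS AND PROOFS =====

-- equation lemmas for A's num = 0 phase
lemma pv_repA_zero_nil (res : List Int) : repetidos_aux 0 [] res = res := by
  rw [repetidos_aux.eq_def]; simp

lemma pv_repA_zero_cons (d : Int) (t res : List Int) :
    repetidos_aux 0 (d :: t) res =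
      if t.contains d then
        if res.contains d then repetidos_aux 0 t res
        else repetidos_aux 0 t (res ++ [d])
      else repetidos_aux 0 t res := by
  rw [repetidos_aux.eq_def]; norm_num

-- Phase 1: for 0 ≤ num, A first pushes num's digits onto digitos exactly as pvCollect does.
lemma pv_collect_eq (num : Int) (digitos resultado : List Int) (h : 0 ≤ num) :
    repetidos_aux num digitos resultado = repetidos_aux 0 (pvCollect num digitos) resultado := by
  by_cases h0 : num = 0
  · subst h0; rw [pvCollect]; simp
  · have hpos : 0 < num := lt_of_le_of_ne h (Ne.symm h0)
    rw [repetidos_aux.eq_def, pvCollect, if_neg h0, if_neg h0, if_pos hpos, if_pos hpos]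
    exact pv_collect_eq _ _ resultado
      (by
        rw [PySem.Int.floordiv_eq_ediv_of_pos (by norm_num : (0:Int) < 10)]
        omega)
termination_by num.toNat
decreasing_by
  rw [PySem.Int.floordiv_eq_ediv_of_pos (by norm_num : (0:Int) < 10)]
  omega

-- Phase 2: B's fold equals A's num = 0 recursion, under the loop invariants
-- "remaining counts the unprocessed suffix" and "seen has exactly res's members".
lemma pv_fold_eq (t : List Int) (rem : PySem.Dict Int Int) (res : List Int)
    (seen : PySem.Set Int)
    (hrem : ∀ x, rem.getD x 0 = (t.count x : Int))
    (hseen : ∀ x, x ∈ seen ↔ x ∈ res) :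
    (t.foldl pvStep (rem, res, seen)).2.1 = repetidos_aux 0 t res := by
  induction t generalizing rem res seen with
  | nil => rw [pv_repA_zero_nil]; simp
  | cons d t ih =>
    rw [pv_repA_zero_cons]
    simp only [List.foldl_cons]
    have hrem' : ∀ x, (rem.insert d (rem.getD d 0 - 1)).getD x 0 = (t.count x : Int) := by
      intro x
      rw [PySem.Dict.getD_insert]
      split
      · next hx => rw [hx, hrem d]; simp [List.count_cons_self]
      · next hx =>
          have hx' : ¬ d = x := fun h => hx h.symm
          rw [hrem x]; simp [hx']
    have hgd : (rem.insert d (rem.getD d 0 - 1)).getD d 0 = (t.count d : Int) := hrem' d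
    by_cases hd : d ∈ t
    · have hdc : t.contains d = true := by simpa using hd
      have hcount : 0 < (rem.insert d (rem.getD d 0 - 1)).getD d 0 := by
        rw [hgd]; exact_mod_cast List.count_pos_iff.mpr hd
      by_cases hr : d ∈ res
      · have hstep : pvStep (rem, res, seen) d = (rem.insert d (rem.getD d 0 - 1), res, seen) := by
          simp only [pvStep]
          exact if_neg (fun hc => hc.2 ((hseen d).mpr hr))
        rw [hstep, if_pos hdc, if_pos (by simpa using hr)]
        exact ih _ _ _ hrem' hseen
      · have hstep : pvStep (rem, res, seen) d =
            (rem.insert d (rem.getD d 0 - 1), res ++ [d], PySem.Set.add seen d) := by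
          simp only [pvStep]
          exact if_pos ⟨hcount, fun hm => hr ((hseen d).mp hm)⟩
        rw [hstep, if_pos hdc, if_neg (by simpa using hr)]
        exact ih _ _ _ hrem'
          (by
            intro x
            rw [PySem.Set.mem_add, hseen x]
            simp [or_comm])
    · have hstep : pvStep (rem, res, seen) d = (rem.insert d (rem.getD d 0 - 1), res, seen) := by
        simp only [pvStep]
        refine if_neg (fun hc => ?_)
        rw [hgd] at hc
        have := List.count_eq_zero_of_not_mem hd
        omega
      rw [hstep, if_neg (by simpa using hd)]
      exact ih _ _ _ hrem' hseen

-- ===== VERDICT (by name: the statement is the Claim_ definition above) =====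
theorem repetidos_aux_spec : Claim_equal_repetidos_aux := by
  intro num digitos resultado _ hpre
  unfold Spec_repetidos_aux repetidos_aux_alt
  rw [pv_collect_eq num digitos resultado hpre]
  exact (pv_fold_eq (pvCollect num digitos) _ resultado _
    (by
      intro x
      rw [PySem.Dict.getD_foldl_insert_add_one, PySem.Dict.getD_empty]
      exact zero_add _)
    (by intro x; simp [PySem.Set.mem_ofList])).symm
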